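-- pv_equiv track=rewrite | github.com/MrBrantCode/unitest_baseline | mut_generate/mist_train_cf/cf_60439/solution.py | formulate_matrix
-- ===== SOURCE A (Python) =====
-- def formulate_matrix(N, M):
--     matrix = [[0 for _ in range(M)] for _ in range(N)]
--
--     for i in range(N):
--         for j in range(M):
--             matrix[i][j] = (i+1)*(j+1)
--
--     for j in range(M):
--         column_sum = sum(matrix[i][j] for i in range(N))
--         if column_sum % 2 != 0 and N>0:
--             matrix[N-1][j] += 1
--
--     return matrix
-- ===== SOURCE B (Python) =====
-- def formulate_matrix(N, M):
--     T = N * (N + 1) // 2  # closed-form sum 1+2+...+N; column j's sum is (j+1)*T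
--     mat = [[(i + 1) * (j + 1) for j in range(M)] for i in range(N - 1)]
--     if N > 0:
--         mat.append([N * (j + 1) + (1 if ((j + 1) * T) % 2 == 1 else 0) for j in range(M)])
--     return mat
-- ===== Notes on version B (the rewrite author's own statement) =====
-- stated objective: alternative
-- what changed: B drops A's second column-summing pass entirely: it builds the first N-1 rows directly and computes the last row with the closed-form column sum (j+1)*N*(N+1)/2 deciding each parity adjustment.
import Mathlib
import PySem

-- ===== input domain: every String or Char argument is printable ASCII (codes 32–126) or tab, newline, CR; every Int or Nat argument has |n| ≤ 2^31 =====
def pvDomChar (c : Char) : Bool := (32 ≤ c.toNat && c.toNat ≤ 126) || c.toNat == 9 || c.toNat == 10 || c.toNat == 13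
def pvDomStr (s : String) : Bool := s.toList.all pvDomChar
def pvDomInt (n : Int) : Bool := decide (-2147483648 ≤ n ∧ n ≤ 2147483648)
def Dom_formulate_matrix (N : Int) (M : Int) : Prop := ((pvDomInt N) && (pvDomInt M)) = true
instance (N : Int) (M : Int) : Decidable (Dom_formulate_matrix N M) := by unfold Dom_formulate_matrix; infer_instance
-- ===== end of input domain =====

-- B replaces A's second column-summing pass by a closed-form parity test computed only for the last row.

-- ===== PORT A =====
def formulate_matrix (N : Int) (M : Int) : List (List Int) :=
  let matrix : List (List Int) :=
    (PySem.List.pyRange 0 N 1).map (fun _ => (PySem.List.pyRange 0 M 1).map (fun _ => (0 : Int)))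
  let matrix :=
    (PySem.List.pyRange 0 N 1).foldl (fun mat i =>
      (PySem.List.pyRange 0 M 1).foldl (fun mat j =>
        PySem.List.pySetD mat i (PySem.List.pySetD (PySem.List.pyGetD mat i []) j ((i+1)*(j+1)))) mat) matrix
  (PySem.List.pyRange 0 M 1).foldl (fun mat j =>
    let columnSum := ((PySem.List.pyRange 0 N 1).map (fun i => PySem.List.pyGetD (PySem.List.pyGetD mat i []) j 0)).sum
    if PySem.Int.mod columnSum 2 ≠ 0 ∧ N > 0 then
      PySem.List.pySetD mat (N-1)
        (PySem.List.pySetD (PySem.List.pyGetD mat (N-1) []) j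
          (PySem.List.pyGetD (PySem.List.pyGetD mat (N-1) []) j 0 + 1))
    else mat) matrix

-- ===== PORT B =====
def formulate_matrix_alt (N : Int) (M : Int) : List (List Int) :=
  let T := PySem.Int.floordiv (N * (N + 1)) 2
  let mat := (PySem.List.pyRange 0 (N - 1) 1).map (fun i =>
    (PySem.List.pyRange 0 M 1).map (fun j => (i+1)*(j+1)))
  if N > 0 then
    mat ++ [(PySem.List.pyRange 0 M 1).map (fun j =>
      N*(j+1) + (if PySem.Int.mod ((j+1)*T) 2 = 1 then 1 else 0))]
  else mat

-- ===== PRECONDITION & SPEC =====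
def Spec_formulate_matrix (N : Int) (M : Int) (out : List (List Int)) : Prop := out = formulate_matrix_alt N M
instance (N : Int) (M : Int) (out : List (List Int)) : Decidable (Spec_formulate_matrix N M out) := by unfold Spec_formulate_matrix; infer_instance

-- ===== CLAIM (what is proved, stated in full; the proofs are below) =====
def Claim_equal_formulate_matrix : Prop := ∀ (N : Int) (M : Int), Dom_formulate_matrix N M → Spec_formulate_matrix N M (formulate_matrix N M)

-- ===== LEMMAS AND PROOFS =====

-- entry (i,j) of the unadjusted matrix
def pvEnt (i j : Nat) : Int := ((i : Int) + 1) * ((j : Int) + 1)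

-- the matrix after A's first pass
def pvBase (n m : Nat) : List (List Int) :=
  (List.range n).map (fun i => (List.range m).map (fun j => pvEnt i j))

-- adjustment of column j, where S = 1 + 2 + ... + n
def pvAdj (S : Int) (j : Nat) : Int :=
  if PySem.Int.mod (((j : Int) + 1) * S) 2 = 1 then 1 else 0

-- the matrix after the first k columns of A's second pass
def pvFinal (n m k : Nat) (S : Int) : List (List Int) :=
  (List.range n).map (fun i =>
    (List.range m).map (fun j => pvEnt i j + (if i = n - 1 ∧ j < k then pvAdj S j else 0)))

theorem pvFoldlConst {α β : Type} (l : List β) (a : α) (f : α → β → α) (h : ∀ x y, f x y = x) :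
    l.foldl f a = a := by
  induction l with
  | nil => rfl
  | cons x xs ih => rw [List.foldl_cons, h]; exact ih

theorem pvRangeCast (X : Int) :
    PySem.List.pyRange 0 X 1 = (List.range X.toNat).map (fun (k : Nat) => (k : Int)) := by
  rw [PySem.List.pyRange_one]
  simp only [sub_zero, zero_add]

theorem pvSetMapRange {α : Type} (f : Nat → α) (n t : Nat) (v : α) :
    ((List.range n).map f).set t v = (List.range n).map (fun i => if i = t then v else f i) := by
  apply List.ext_getElem (by simp)
  intro i h1 h2
  simp only [List.getElem_set, List.getElem_map, List.getElem_range]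
  rcases eq_or_ne t i with h | h
  · simp [h]
  · simp [h, Ne.symm h]

theorem pvRowFill (f : Nat → Int) (m : Nat) (row : List Int) (h : row.length = m) :
    ∀ k, k ≤ m →
      (List.range k).foldl (fun r j => r.set j (f j)) row
        = (List.range k).map (fun j => f j) ++ row.drop k := by
  intro k
  induction k with
  | zero => intro _; simp
  | succ k ih =>
    intro hk
    rw [List.range_succ, List.foldl_append, ih (by omega), List.foldl_cons, List.foldl_nil]
    have hkm : k < row.length := by omega
    simp
    rw [List.drop_eq_getElem_cons hkm, List.set_cons_zero]

theorem pvInner (F : List Int → Nat → List Int) (l : List Nat) :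
    ∀ (mat : List (List Int)) (i : Nat), i < mat.length →
      l.foldl (fun mat j => mat.set i (F (mat.getD i []) j)) mat
        = mat.set i (l.foldl F (mat.getD i [])) := by
  induction l with
  | nil =>
    intro mat i hi
    rw [List.foldl_nil, List.foldl_nil, List.getD_eq_getElem?_getD,
        List.getElem?_eq_getElem hi]
    simp
  | cons x xs ih =>
    intro mat i hi
    have hv : (mat.set i (F (mat.getD i []) x)).getD i [] = F (mat.getD i []) x := by
      rw [List.getD_eq_getElem?_getD, List.getElem?_set_self hi]; rfl
    rw [List.foldl_cons, ih _ i (by simpa using hi), hv, List.set_set, List.foldl_cons]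

theorem pvMatFill (n m : Nat) (mat : List (List Int))
    (hlen : mat.length = n) (hrows : ∀ r ∈ mat, r.length = m) :
    ∀ k, k ≤ n →
      (List.range k).foldl (fun mt (i : Nat) =>
          (List.range m).foldl (fun mt2 (j : Nat) =>
            mt2.set i ((mt2.getD i []).set j (((i : Int)+1)*((j : Int)+1)))) mt) mat
        = (List.range k).map (fun i => (List.range m).map (fun j => pvEnt i j)) ++ mat.drop k := by
  intro k
  induction k with
  | zero => intro _; simp
  | succ k ih =>
    intro hk
    rw [List.range_succ, List.foldl_append, ih (by omega), List.foldl_cons, List.foldl_nil]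
    have hkn : k < mat.length := by omega
    have hlenpre : ((List.range k).map (fun i => (List.range m).map (fun j => pvEnt i j))).length = k := by simp
    have hdrop : mat.drop k = mat[k] :: mat.drop (k+1) := List.drop_eq_getElem_cons hkn
    have hrowk : (((List.range k).map (fun i => (List.range m).map (fun j => pvEnt i j))) ++ mat.drop k).getD k [] = mat[k] := by
      rw [List.getD_eq_getElem?_getD, List.getElem?_append_right (by omega), hlenpre, hdrop]
      simp [List.getElem?_eq_getElem hkn]
    have hlentot : k < (((List.range k).map (fun i => (List.range m).map (fun j => pvEnt i j))) ++ mat.drop k).length := by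
      rw [List.length_append, hlenpre, List.length_drop]; omega
    have hdropm : List.drop m mat[k] = [] :=
      List.drop_eq_nil_of_le (le_of_eq (hrows _ (List.getElem_mem hkn)))
    rw [pvInner (fun r (j : Nat) => r.set j (((k : Int)+1)*((j : Int)+1))) (List.range m) _ k hlentot, hrowk,
        pvRowFill (fun (j : Nat) => ((k : Int)+1)*((j : Int)+1)) m mat[k] (hrows _ (List.getElem_mem hkn)) m le_rfl,
        hdropm, List.append_nil, hdrop, List.set_append]
    simp [pvEnt]
    rw [List.drop_eq_getElem_cons hkn, List.set_cons_zero]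

theorem pvTwoS (n : Nat) :
    2 * ((List.range n).map (fun (i : Nat) => (i : Int) + 1)).sum = (n : Int) * ((n : Int) + 1) := by
  induction n with
  | zero => simp
  | succ n ih =>
    rw [List.range_succ, List.map_append, List.sum_append]
    push_cast
    push_cast at ih
    simp only [List.map_cons, List.map_nil, List.sum_cons, List.sum_nil]
    linear_combination ih

theorem pvColEntry (n m k : Nat) (S : Int) (hk : k < m) (i : Nat) (hi : i < n) :
    ((pvFinal n m k S).getD i []).getD k 0 = pvEnt i k := by
  unfold pvFinal
  rw [PySem.List.getD_map_range _ _ _ _ hi, PySem.List.getD_map_range _ _ _ _ hk]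
  simp

theorem pvColSum (n m k : Nat) (S : Int) (hk : k < m)
    (hS : ((List.range n).map (fun (i : Nat) => (i : Int) + 1)).sum = S) :
    ((List.range n).map (fun i => ((pvFinal n m k S).getD i []).getD k 0)).sum = ((k : Int) + 1) * S := by
  rw [List.map_congr_left (fun i hi => pvColEntry n m k S hk i (List.mem_range.mp hi))]
  unfold pvEnt
  rw [List.sum_map_mul_right, hS, mul_comm]

theorem pvStep0 (n m k : Nat) (S : Int) (hA : pvAdj S k = 0) :
    pvFinal n m k S = pvFinal n m (k+1) S := by
  unfold pvFinal
  apply List.map_congr_left; intro i _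
  apply List.map_congr_left; intro j _
  split_ifs with h1 h2 h2
  · rfl
  · exact absurd ⟨h1.1, by omega⟩ h2
  · have hj : j = k := by rcases h2 with ⟨hi2, hj2⟩; by_contra hne; exact h1 ⟨hi2, by omega⟩
    rw [hj, hA]
  · rfl

theorem pvStep1 (n m k : Nat) (S : Int) (hn : 0 < n) (hk : k < m) (hA : pvAdj S k = 1) :
    (pvFinal n m k S).set (n-1)
        (((pvFinal n m k S).getD (n-1) []).set k
          (((pvFinal n m k S).getD (n-1) []).getD k 0 + 1))
      = pvFinal n m (k+1) S := by
  have hrow : (pvFinal n m k S).getD (n-1) []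
      = (List.range m).map (fun j => pvEnt (n-1) j + (if (n-1) = n - 1 ∧ j < k then pvAdj S j else 0)) := by
    unfold pvFinal
    exact PySem.List.getD_map_range _ _ _ _ (by omega)
  rw [hrow, PySem.List.getD_map_range _ _ _ _ hk]
  unfold pvFinal
  rw [pvSetMapRange, pvSetMapRange]
  apply List.map_congr_left; intro i hi
  rcases eq_or_ne i (n-1) with hieq | hine
  · rw [if_pos hieq, hieq]
    apply List.map_congr_left; intro j hj
    rcases eq_or_ne j k with hjeq | hjne
    · rw [if_pos hjeq, hjeq]
      rw [if_neg (by omega : ¬((n-1 = n - 1) ∧ k < k)), if_pos ⟨rfl, Nat.lt_succ_self k⟩, hA]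
      ring
    · rw [if_neg hjne]
      split_ifs with h1 h2 h2 <;> first | rfl | omega
  · rw [if_neg hine]
    apply List.map_congr_left; intro j hj
    split_ifs with h1 h2 h2 <;> first | rfl | (exact absurd h1.1 hine) | (exact absurd h2.1 hine)

theorem pvBaseFinal (n m : Nat) (S : Int) : pvBase n m = pvFinal n m 0 S := by
  unfold pvBase pvFinal
  simp

theorem pvPhase2 (n m : Nat) (hn : 0 < n) (S : Int)
    (hS : ((List.range n).map (fun (i : Nat) => (i : Int) + 1)).sum = S) :
    ∀ k, k ≤ m →
      (List.range k).foldl (fun mat (j : Nat) =>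
          if PySem.Int.mod (((List.range n).map (fun (i : Nat) => (mat.getD i []).getD j 0)).sum) 2 ≠ 0 ∧ ((n : Int) > 0) then
            mat.set (n-1) ((mat.getD (n-1) []).set j ((mat.getD (n-1) []).getD j 0 + 1))
          else mat) (pvBase n m)
        = pvFinal n m k S := by
  intro k
  induction k with
  | zero => intro _; simp [pvBaseFinal n m S]
  | succ k ih =>
    intro hk
    rw [List.range_succ, List.foldl_append, ih (by omega), List.foldl_cons, List.foldl_nil,
        pvColSum n m k S (by omega) hS]
    by_cases hA : PySem.Int.mod (((k : Int) + 1) * S) 2 = 1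
    · rw [if_pos ⟨by rw [hA]; norm_num, by exact_mod_cast hn⟩]
      exact pvStep1 n m k S hn (by omega) (by unfold pvAdj; rw [if_pos hA])
    · have hzero : PySem.Int.mod (((k : Int) + 1) * S) 2 = 0 := by
        rcases PySem.Int.mod_two_eq (((k : Int) + 1) * S) with h | h
        · exact h
        · exact absurd h hA
      rw [if_neg (by rw [hzero]; simp)]
      exact pvStep0 n m k S (by unfold pvAdj; rw [if_neg hA])

theorem formulate_matrix_spec : Claim_equal_formulate_matrix := by
  intro N M _
  unfold Spec_formulate_matrix formulate_matrix formulate_matrix_alt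
  by_cases hN : 0 < N
  · obtain ⟨n, rfl⟩ := Int.eq_ofNat_of_zero_le hN.le
    have hn : 0 < n := by exact_mod_cast hN
    simp only [pvRangeCast, Int.toNat_natCast, List.map_map, List.foldl_map,
      Function.comp_def, PySem.List.pyGetD_natCast, PySem.List.pySetD_natCast]
    set m := M.toNat with hm
    set S : Int := ((List.range n).map (fun (i : Nat) => (i : Int) + 1)).sum with hS
    have hcast : ((n : Int)) - 1 = ((n - 1 : Nat) : Int) := by omega
    have hT : PySem.Int.floordiv ((n : Int) * ((n : Int) + 1)) 2 = S := by
      rw [PySem.Int.floordiv_eq_ediv_of_pos (by norm_num), ← pvTwoS n, ← hS]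
      exact Int.mul_ediv_cancel_left S (by norm_num)
    rw [pvMatFill n m _ (by simp) (by intro r hr; simp at hr; obtain ⟨i, -, rfl⟩ := hr; simp) n le_rfl]
    rw [List.drop_eq_nil_of_le (by simp), List.append_nil]
    rw [show ((List.range n).map (fun i => (List.range m).map (fun j => pvEnt i j))) = pvBase n m from rfl]
    rw [hcast]
    simp only [PySem.List.pyGetD_natCast, PySem.List.pySetD_natCast]
    rw [pvPhase2 n m hn S hS.symm m le_rfl, hT, if_pos hN]
    unfold pvFinal
    have hsplit : List.range n = List.range (n-1) ++ [n-1] := by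
      conv_lhs => rw [show n = n - 1 + 1 from by omega]
      rw [List.range_succ]
    rw [hsplit, List.map_append]
    congr 1
    · apply List.map_congr_left; intro i hi
      have hi' : i < n - 1 := List.mem_range.mp hi
      apply List.map_congr_left; intro j hj
      rw [if_neg (by rintro ⟨h, -⟩; omega)]
      simp [pvEnt]
    · simp only [List.map_cons, List.map_nil]
      congr 1
      apply List.map_congr_left; intro j hj
      have hj' : j < m := List.mem_range.mp hj
      rw [if_pos ⟨by trivial, hj'⟩]
      unfold pvEnt pvAdj
      have hsucc : ((n - 1 : Nat) : Int) + 1 = (n : Int) := by omega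
      rw [hsucc]
  · have h0 : PySem.List.pyRange 0 N 1 = [] := PySem.List.pyRange_one_eq_nil (by omega)
    have h0' : PySem.List.pyRange 0 (N - 1) 1 = [] := PySem.List.pyRange_one_eq_nil (by omega)
    simp only [h0, h0', List.map_nil, List.foldl_nil]
    rw [if_neg hN]
    apply pvFoldlConst
    intro mat j
    simp only [List.sum_nil]
    rw [if_neg]
    rintro ⟨-, h⟩
    exact hN h
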